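-- pv_equiv track=rewrite | github.com/HaymayndzUltra/voice-assistant-prod | docker_groups_parser.py | map_pc2_services_to_docker
-- ===== SOURCE A (Python) =====
-- def map_pc2_services_to_docker(pc2_services):
--     """Map PC2 services to docker_groups structure"""
--     docker_groups = {
--         "infra_core": [],
--         "memory_stack": [],
--         "async_pipeline": [],
--         "tutoring_cpu": [],
--         "vision_dream_gpu": [],
--         "utility_suite": [],
--         "web_interface": []
--     }
--
--     # Define which services go to which docker groups
--     service_mapping = {
--         "ObservabilityHub": "infra_core",
--         "ResourceManager": "infra_core",
--         "MemoryOrchestratorService": "memory_stack",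
--         "CacheManager": "memory_stack",
--         "UnifiedMemoryReasoningAgent": "memory_stack",
--         "ContextManager": "memory_stack",
--         "ExperienceTracker": "memory_stack",
--         "AsyncProcessor": "async_pipeline",
--         "TaskScheduler": "async_pipeline",
--         "AdvancedRouter": "async_pipeline",
--         "TieredResponder": "async_pipeline",
--         "TutorAgent": "tutoring_cpu",
--         "TutoringAgent": "tutoring_cpu",
--         "VisionProcessingAgent": "vision_dream_gpu",
--         "DreamWorldAgent": "vision_dream_gpu",
--         "DreamingModeAgent": "vision_dream_gpu",
--         "UnifiedUtilsAgent": "utility_suite",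
--         "FileSystemAssistantAgent": "utility_suite",
--         "RemoteConnectorAgent": "utility_suite",
--         "AuthenticationAgent": "utility_suite",
--         "AgentTrustScorer": "utility_suite",
--         "ProactiveContextMonitor": "utility_suite",
--         "UnifiedWebAgent": "web_interface"
--     }
--
--     for service in pc2_services:
--         if isinstance(service, dict) and "name" in service and "script_path" in service:
--             service_name = service["name"]
--             if service_name in service_mapping:
--                 docker_group = service_mapping[service_name]
--                 docker_groups[docker_group].append({
--                     "name": service_name,
--                     "script_path": service["script_path"]
--                 })
--
--     return docker_groups
-- ===== SOURCE B (Python) =====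
-- GROUP_MEMBERS = {
--     "infra_core": ["ObservabilityHub", "ResourceManager"],
--     "memory_stack": ["MemoryOrchestratorService", "CacheManager",
--                      "UnifiedMemoryReasoningAgent", "ContextManager",
--                      "ExperienceTracker"],
--     "async_pipeline": ["AsyncProcessor", "TaskScheduler", "AdvancedRouter",
--                        "TieredResponder"],
--     "tutoring_cpu": ["TutorAgent", "TutoringAgent"],
--     "vision_dream_gpu": ["VisionProcessingAgent", "DreamWorldAgent",
--                          "DreamingModeAgent"],
--     "utility_suite": ["UnifiedUtilsAgent", "FileSystemAssistantAgent",
--                       "RemoteConnectorAgent", "AuthenticationAgent",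
--                       "AgentTrustScorer", "ProactiveContextMonitor"],
--     "web_interface": ["UnifiedWebAgent"],
-- }
--
--
-- def map_pc2_services_to_docker(pc2_services):
--     """Map PC2 services to docker_groups structure (per-group filtering pass)."""
--     return {
--         group: [
--             {"name": s["name"], "script_path": s["script_path"]}
--             for s in pc2_services
--             if isinstance(s, dict) and "name" in s and "script_path" in s
--             and s["name"] in members
--         ]
--         for group, members in GROUP_MEMBERS.items()
--     }
-- ===== Notes on version B (the rewrite author's own statement) =====
-- stated objective: alternative
-- what changed: B inverts the mapping into a fixed group->member-names table and builds each of the seven group lists by an independent filtering pass over the input, instead of A's single dispatch loop that appends into a mutable dict via a name->group lookup.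
import Mathlib
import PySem

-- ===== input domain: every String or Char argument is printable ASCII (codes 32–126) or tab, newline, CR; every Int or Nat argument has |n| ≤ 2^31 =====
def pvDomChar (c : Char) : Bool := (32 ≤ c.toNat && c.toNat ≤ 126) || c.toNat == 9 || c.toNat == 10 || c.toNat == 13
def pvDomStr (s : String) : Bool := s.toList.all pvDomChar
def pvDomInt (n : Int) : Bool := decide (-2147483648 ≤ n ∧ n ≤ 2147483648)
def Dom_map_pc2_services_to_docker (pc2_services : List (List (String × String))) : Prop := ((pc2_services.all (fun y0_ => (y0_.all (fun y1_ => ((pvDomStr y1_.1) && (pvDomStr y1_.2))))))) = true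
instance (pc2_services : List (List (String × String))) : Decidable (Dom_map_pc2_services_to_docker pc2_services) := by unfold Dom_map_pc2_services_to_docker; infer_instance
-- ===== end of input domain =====

-- B replaces A's single dispatch loop (name→group dict, append into a mutable dict) by a fixed
-- group→member-names table and one independent filtering pass over the input per group (objective: alternative).
-- Return-value equivalence only; neither program mutates its argument.

-- ===== PORT A =====
-- Python dict literal 'service_mapping'
def pvServiceMapping : PySem.Dict String String := PySem.Dict.ofList
  [("ObservabilityHub", "infra_core"), ("ResourceManager", "infra_core"),
   ("MemoryOrchestratorService", "memory_stack"), ("CacheManager", "memory_stack"),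
   ("UnifiedMemoryReasoningAgent", "memory_stack"), ("ContextManager", "memory_stack"),
   ("ExperienceTracker", "memory_stack"),
   ("AsyncProcessor", "async_pipeline"), ("TaskScheduler", "async_pipeline"),
   ("AdvancedRouter", "async_pipeline"), ("TieredResponder", "async_pipeline"),
   ("TutorAgent", "tutoring_cpu"), ("TutoringAgent", "tutoring_cpu"),
   ("VisionProcessingAgent", "vision_dream_gpu"), ("DreamWorldAgent", "vision_dream_gpu"),
   ("DreamingModeAgent", "vision_dream_gpu"),
   ("UnifiedUtilsAgent", "utility_suite"), ("FileSystemAssistantAgent", "utility_suite"),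
   ("RemoteConnectorAgent", "utility_suite"), ("AuthenticationAgent", "utility_suite"),
   ("AgentTrustScorer", "utility_suite"), ("ProactiveContextMonitor", "utility_suite"),
   ("UnifiedWebAgent", "web_interface")]

-- Python dict literal 'docker_groups'
def pvGroups0 : PySem.Dict String (List (List (String × String))) := PySem.Dict.ofList
  [("infra_core", []), ("memory_stack", []), ("async_pipeline", []), ("tutoring_cpu", []),
   ("vision_dream_gpu", []), ("utility_suite", []), ("web_interface", [])]

-- the body of A's 'for service in pc2_services' loop; 'isinstance(service, dict)' is always true on
-- the typed domain; service["name"]/service["script_path"] are guarded by the 'in' checks, so getD is exact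
def pvStepA (d : PySem.Dict String (List (List (String × String)))) (service : List (String × String)) :
    PySem.Dict String (List (List (String × String))) :=
  if (PySem.Dict.mk service).contains "name" && (PySem.Dict.mk service).contains "script_path" then
    match pvServiceMapping.get? ((PySem.Dict.mk service).getD "name" "") with
    | some g => d.modify g []
        (fun xs => xs ++ [[("name", (PySem.Dict.mk service).getD "name" ""),
                           ("script_path", (PySem.Dict.mk service).getD "script_path" "")]])
    | none => d
  else d

def map_pc2_services_to_docker (pc2_services : List (List (String × String))) :
    List (String × List (List (String × String))) :=
  (pc2_services.foldl pvStepA pvGroups0).items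

-- ===== PORT B =====
-- Python dict literal 'GROUP_MEMBERS'
def pvGroupMembers : List (String × List String) :=
  [("infra_core", ["ObservabilityHub", "ResourceManager"]),
   ("memory_stack", ["MemoryOrchestratorService", "CacheManager", "UnifiedMemoryReasoningAgent",
                     "ContextManager", "ExperienceTracker"]),
   ("async_pipeline", ["AsyncProcessor", "TaskScheduler", "AdvancedRouter", "TieredResponder"]),
   ("tutoring_cpu", ["TutorAgent", "TutoringAgent"]),
   ("vision_dream_gpu", ["VisionProcessingAgent", "DreamWorldAgent", "DreamingModeAgent"]),
   ("utility_suite", ["UnifiedUtilsAgent", "FileSystemAssistantAgent", "RemoteConnectorAgent",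
                      "AuthenticationAgent", "AgentTrustScorer", "ProactiveContextMonitor"]),
   ("web_interface", ["UnifiedWebAgent"])]

-- {"name": s["name"], "script_path": s["script_path"]} (both keys guarded by the filter)
def pvEntry (s : List (String × String)) : List (String × String) :=
  [("name", (PySem.Dict.mk s).getD "name" ""),
   ("script_path", (PySem.Dict.mk s).getD "script_path" "")]

def map_pc2_services_to_docker_alt (pc2_services : List (List (String × String))) :
    List (String × List (List (String × String))) :=
  pvGroupMembers.map (fun gm =>
    (gm.1, (pc2_services.filter (fun s =>
        (PySem.Dict.mk s).contains "name" && (PySem.Dict.mk s).contains "script_path" &&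
        gm.2.contains ((PySem.Dict.mk s).getD "name" ""))).map pvEntry))

-- ===== PRECONDITION & SPEC =====
def Spec_map_pc2_services_to_docker (pc2_services : List (List (String × String))) (out : List (String × List (List (String × String)))) : Prop := out = map_pc2_services_to_docker_alt pc2_services
instance (pc2_services : List (List (String × String))) (out : List (String × List (List (String × String)))) : Decidable (Spec_map_pc2_services_to_docker pc2_services out) := by unfold Spec_map_pc2_services_to_docker; infer_instance

-- ===== CLAIM (what is proved, stated in full; the proofs are below) =====
def Claim_equal_map_pc2_services_to_docker : Prop := ∀ (pc2_services : List (List (String × String))), Dom_map_pc2_services_to_docker pc2_services → Spec_map_pc2_services_to_docker pc2_services (map_pc2_services_to_docker pc2_services)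

-- ===== LEMMAS AND PROOFS =====

-- what A's loop appends to group g, phrased as B's filter-then-map but with A's lookup test
def pvCollect (g : String) (l : List (List (String × String))) : List (List (String × String)) :=
  (l.filter (fun s =>
      ((PySem.Dict.mk s).contains "name" && (PySem.Dict.mk s).contains "script_path") &&
      decide (pvServiceMapping.get? ((PySem.Dict.mk s).getD "name" "") = some g))).map pvEntry

lemma pvCollect_cons (g : String) (s : List (String × String)) (t : List (List (String × String))) :
    pvCollect g (s :: t) =
      (if ((PySem.Dict.mk s).contains "name" && (PySem.Dict.mk s).contains "script_path") &&
          decide (pvServiceMapping.get? ((PySem.Dict.mk s).getD "name" "") = some g)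
       then [pvEntry s] else []) ++ pvCollect g t := by
  simp only [pvCollect, List.filter_cons]
  split <;> simp

lemma pvGetD_loop (l : List (List (String × String)))
    (d : PySem.Dict String (List (List (String × String)))) (g : String) :
    (l.foldl pvStepA d).getD g [] = d.getD g [] ++ pvCollect g l := by
  induction l generalizing d with
  | nil => simp [pvCollect]
  | cons s t ih =>
    simp only [List.foldl_cons, pvCollect_cons]
    rw [ih]
    unfold pvStepA
    cases hgu : ((PySem.Dict.mk s).contains "name" && (PySem.Dict.mk s).contains "script_path") with
    | false =>
      rw [if_neg (by simp)]
      simp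
    | true =>
      rw [if_pos (by simp)]
      rcases hm : pvServiceMapping.get? ((PySem.Dict.mk s).getD "name" "") with _ | g0
      · simp
      · rw [PySem.Dict.getD_modify]
        by_cases hg : g = g0
        · subst hg
          simp [pvEntry]
        · simp [Ne.symm hg, hg]

lemma pvKeys_loop (l : List (List (String × String)))
    (d : PySem.Dict String (List (List (String × String))))
    (hd : ∀ n g, pvServiceMapping.get? n = some g → d.contains g = true) :
    (l.foldl pvStepA d).keys = d.keys := by
  induction l generalizing d with
  | nil => rfl
  | cons s t ih =>
    simp only [List.foldl_cons]
    have hd' : ∀ n g, pvServiceMapping.get? n = some g → (pvStepA d s).contains g = true := by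
      intro n g hng
      unfold pvStepA
      split
      · split
        · rw [PySem.Dict.contains_modify]; simp [hd _ _ hng]
        · exact hd _ _ hng
      · exact hd _ _ hng
    have hkeys : (pvStepA d s).keys = d.keys := by
      unfold pvStepA
      split
      · split
        · next g0 hm =>
            rw [PySem.Dict.keys_modify, PySem.Dict.keys_insert_of_contains _ _ (hd _ _ hm)]
        · rfl
      · rfl
    rw [ih _ hd', hkeys]

lemma pvGroups0_contains : ∀ n g, pvServiceMapping.get? n = some g → pvGroups0.contains g = true := by
  intro n g h
  have hi := PySem.Dict.mem_items_of_get?_eq_some _ h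
  have hg : g ∈ pvServiceMapping.items.map Prod.snd := List.mem_map_of_mem hi
  have hall : ∀ x ∈ pvServiceMapping.items.map Prod.snd, pvGroups0.contains x = true := by decide
  exact hall g hg

-- A's membership test equals B's per-group name list, name by name
lemma pvBridge : ∀ p ∈ pvGroupMembers, ∀ n : String,
    decide (pvServiceMapping.get? n = some p.1) = p.2.contains n := by
  intro p hp n
  rw [List.contains_eq_mem]
  apply decide_eq_decide.mpr
  rw [PySem.Dict.get?_eq_some_iff_mem_items _ _ _ (by decide : pvServiceMapping.keys.Nodup)]
  rw [show pvServiceMapping.items =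
    [("ObservabilityHub", "infra_core"), ("ResourceManager", "infra_core"),
     ("MemoryOrchestratorService", "memory_stack"), ("CacheManager", "memory_stack"),
     ("UnifiedMemoryReasoningAgent", "memory_stack"), ("ContextManager", "memory_stack"),
     ("ExperienceTracker", "memory_stack"),
     ("AsyncProcessor", "async_pipeline"), ("TaskScheduler", "async_pipeline"),
     ("AdvancedRouter", "async_pipeline"), ("TieredResponder", "async_pipeline"),
     ("TutorAgent", "tutoring_cpu"), ("TutoringAgent", "tutoring_cpu"),
     ("VisionProcessingAgent", "vision_dream_gpu"), ("DreamWorldAgent", "vision_dream_gpu"),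
     ("DreamingModeAgent", "vision_dream_gpu"),
     ("UnifiedUtilsAgent", "utility_suite"), ("FileSystemAssistantAgent", "utility_suite"),
     ("RemoteConnectorAgent", "utility_suite"), ("AuthenticationAgent", "utility_suite"),
     ("AgentTrustScorer", "utility_suite"), ("ProactiveContextMonitor", "utility_suite"),
     ("UnifiedWebAgent", "web_interface")] from by decide]
  simp only [pvGroupMembers] at hp
  fin_cases hp <;>
    · simp [Prod.ext_iff]
      try tauto

lemma pvCollect_eq (p : String × List String) (hp : p ∈ pvGroupMembers)
    (l : List (List (String × String))) :
    pvCollect p.1 l = (l.filter (fun s =>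
        (PySem.Dict.mk s).contains "name" && (PySem.Dict.mk s).contains "script_path" &&
        p.2.contains ((PySem.Dict.mk s).getD "name" ""))).map pvEntry := by
  unfold pvCollect
  congr 1
  apply List.filter_congr
  intro s _
  rw [pvBridge p hp, Bool.and_assoc]

-- ===== VERDICT (by name: the statement is the Claim_ definition above) =====
theorem map_pc2_services_to_docker_spec : Claim_equal_map_pc2_services_to_docker := by
  intro l _
  show map_pc2_services_to_docker l = map_pc2_services_to_docker_alt l
  unfold map_pc2_services_to_docker
  have hk : (l.foldl pvStepA pvGroups0).keys = pvGroups0.keys :=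
    pvKeys_loop l pvGroups0 pvGroups0_contains
  have hnd : (l.foldl pvStepA pvGroups0).keys.Nodup := by
    rw [hk]; exact PySem.Dict.nodup_keys_ofList _
  rw [PySem.Dict.items_eq_map_keys _ hnd [], hk,
      show pvGroups0.keys = pvGroupMembers.map Prod.fst from by decide]
  unfold map_pc2_services_to_docker_alt
  rw [List.map_map]
  apply List.map_congr_left
  intro p hp
  show (p.1, (l.foldl pvStepA pvGroups0).getD p.1 []) = _
  rw [pvGetD_loop,
      show pvGroups0.getD p.1 [] = [] from by
        have hq : ∀ q ∈ pvGroupMembers, pvGroups0.getD q.1 [] = [] := by decide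
        exact hq p hp,
      List.nil_append, pvCollect_eq p hp]
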